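-- pv_equiv track=rewrite | github.com/jabalka/string-art | stringart/pattern_init.py | bootstrap_steps
-- ===== SOURCE A (Python) =====
-- from typing import List, Tuple
--
-- def bootstrap_steps(nail_count: int, hop_k: int, num_steps: int) -> List[Tuple[int, int]]:
--     """Create an initial step sequence (i -> i + hop_k) of given length."""
--     steps_out: List[Tuple[int, int]] = []
--     current_index = 0
--     for _ in range(num_steps):
--         next_index = (current_index + hop_k) % nail_count
--         steps_out.append((current_index, next_index))
--         current_index = next_index
--     return steps_out
-- ===== SOURCE B (Python) =====
-- from typing import List, Tuple
--
-- def bootstrap_steps(nail_count: int, hop_k: int, num_steps: int) -> List[Tuple[int, int]]: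
--     """Create an initial step sequence (i -> i + hop_k) of given length.
--
--     Stateless re-implementation: the running index after i hops is just
--     (i * hop_k) % nail_count, so each tuple is computed directly from its
--     position instead of being carried through an accumulator.
--     """
--     return [((i * hop_k) % nail_count, ((i + 1) * hop_k) % nail_count)
--             for i in range(num_steps)]
-- ===== Notes on version B (the rewrite author's own statement) =====
-- stated objective: simpler
-- what changed: Replaced the stateful loop carrying current_index with a stateless comprehension computing each tuple directly from its position via the closed form (i*hop_k) % nail_count.
import Mathlib
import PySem

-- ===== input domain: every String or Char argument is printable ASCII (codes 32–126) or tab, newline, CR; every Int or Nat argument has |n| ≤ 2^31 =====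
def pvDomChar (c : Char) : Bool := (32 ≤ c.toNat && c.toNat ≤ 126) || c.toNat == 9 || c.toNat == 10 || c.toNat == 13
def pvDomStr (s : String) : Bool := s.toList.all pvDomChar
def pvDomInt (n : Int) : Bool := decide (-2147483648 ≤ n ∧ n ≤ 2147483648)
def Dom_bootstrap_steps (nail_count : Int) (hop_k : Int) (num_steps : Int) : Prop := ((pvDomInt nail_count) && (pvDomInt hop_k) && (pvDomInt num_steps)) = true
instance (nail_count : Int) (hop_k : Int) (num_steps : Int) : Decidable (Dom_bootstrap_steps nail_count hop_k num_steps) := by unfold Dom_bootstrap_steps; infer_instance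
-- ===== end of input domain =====

-- B replaces A's stateful loop (carried current_index) with a stateless
-- position-indexed comprehension using the closed form (i*hop_k) % nail_count.


-- ===== PORT A =====
-- for _ in range(num_steps): the loop body ignores the loop variable;
-- state = (steps_out, current_index)
def bootstrap_steps (nail_count : Int) (hop_k : Int) (num_steps : Int) : List (Int × Int) :=
  ((PySem.List.pyRange 0 num_steps).foldl
    (fun (st : List (Int × Int) × Int) _ =>
      let next_index := PySem.Int.mod (st.2 + hop_k) nail_count
      (st.1 ++ [(st.2, next_index)], next_index))
    ([], 0)).1

-- ===== PORT B =====
def bootstrap_steps_alt (nail_count : Int) (hop_k : Int) (num_steps : Int) : List (Int × Int) :=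
  (PySem.List.pyRange 0 num_steps).map
    (fun i => (PySem.Int.mod (i * hop_k) nail_count,
               PySem.Int.mod ((i + 1) * hop_k) nail_count))

-- ===== PRECONDITION & SPEC =====
-- Pre_ excludes exactly the inputs where A raises ZeroDivisionError:
-- nail_count == 0 with at least one loop iteration (num_steps > 0).
def Pre_bootstrap_steps (nail_count : Int) (hop_k : Int) (num_steps : Int) : Prop :=
  nail_count ≠ 0 ∨ num_steps ≤ 0
instance (nail_count : Int) (hop_k : Int) (num_steps : Int) : Decidable (Pre_bootstrap_steps nail_count hop_k num_steps) := by unfold Pre_bootstrap_steps; infer_instance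

def pvWitness_bootstrap_steps : Int × Int × Int := (7, 3, 5)

def Spec_bootstrap_steps (nail_count : Int) (hop_k : Int) (num_steps : Int) (out : List (Int × Int)) : Prop := out = bootstrap_steps_alt nail_count hop_k num_steps
instance (nail_count : Int) (hop_k : Int) (num_steps : Int) (out : List (Int × Int)) : Decidable (Spec_bootstrap_steps nail_count hop_k num_steps out) := by unfold Spec_bootstrap_steps; infer_instance

-- ===== CLAIM (what is proved, stated in full; the proofs are below) =====
def Claim_equal_bootstrap_steps : Prop := ∀ (nail_count : Int) (hop_k : Int) (num_steps : Int), Dom_bootstrap_steps nail_count hop_k num_steps → Pre_bootstrap_steps nail_count hop_k num_steps → Spec_bootstrap_steps nail_count hop_k num_steps (bootstrap_steps nail_count hop_k num_steps)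

-- ===== LEMMAS AND PROOFS =====

-- Python's '%' is invariant under first reducing the left summand.
theorem pv_mod_add_mod (a hop b : Int) :
    PySem.Int.mod (PySem.Int.mod a b + hop) b = PySem.Int.mod (a + hop) b := by
  simp [PySem.Int.mod]

-- Loop invariant over range n: the accumulated list is B's map, and the
-- carried current_index equals the closed form (n*hop_k) % nail_count.
theorem pv_inv (nail_count hop_k : Int) (n : Nat) :
    (((List.range n).map (fun (k : Nat) => (k : Int))).foldl
      (fun (st : List (Int × Int) × Int) _ =>
        let next_index := PySem.Int.mod (st.2 + hop_k) nail_count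
        (st.1 ++ [(st.2, next_index)], next_index))
      ([], 0)) =
    (((List.range n).map (fun (k : Nat) => (k : Int))).map
      (fun i => (PySem.Int.mod (i * hop_k) nail_count,
                 PySem.Int.mod ((i + 1) * hop_k) nail_count)),
     PySem.Int.mod ((n : Int) * hop_k) nail_count) := by
  induction n with
  | zero => simp [PySem.Int.mod]
  | succ n ih =>
    simp only [List.range_succ, List.map_append, List.foldl_append, ih,
      List.map_cons, List.map_nil, List.foldl_cons, List.foldl_nil]
    push_cast
    rw [pv_mod_add_mod, show ((n : Int) + 1) * hop_k = (n : Int) * hop_k + hop_k from by ring]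

-- ===== VERDICT (by name: the statement is the Claim_ definition above) =====
theorem bootstrap_steps_spec : Claim_equal_bootstrap_steps := by
  intro nail_count hop_k num_steps _ _
  unfold Spec_bootstrap_steps bootstrap_steps bootstrap_steps_alt
  by_cases h : num_steps ≤ 0
  · have he : PySem.List.pyRange 0 num_steps = [] := by
      simp [PySem.List.pyRange]; omega
    rw [he]; rfl
  · push_neg at h
    obtain ⟨n, rfl⟩ : ∃ n : Nat, num_steps = (n : Int) :=
      ⟨num_steps.toNat, (Int.toNat_of_nonneg h.le).symm⟩
    rw [PySem.List.pyRange_zero_natCast]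
    rw [pv_inv]
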